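-- pv_equiv track=rewrite | github.com/PawnDragon/Ferret | optimizers/submuon_utils.py | _is_target_layer_name
-- ===== SOURCE A (Python) =====
-- def _is_target_layer_name(layer_name, target_modules):
--     if target_modules == 'all-linear':
--         return True
--     leaf_name = layer_name.split('.')[-1]
--     for token in target_modules:
--         if layer_name == token or layer_name.endswith(f'.{token}') or leaf_name == token:
--             return True
--     return False
-- ===== SOURCE B (Python) =====
-- def _is_target_layer_name(layer_name, target_modules):
--     if target_modules == 'all-linear':
--         return True
--     parts = layer_name.split('.')
--     suffixes = {'.'.join(parts[i:]) for i in range(len(parts))}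
--     return any(token in suffixes for token in target_modules)
-- ===== Notes on version B (the rewrite author's own statement) =====
-- stated objective: alternative
-- what changed: Instead of testing each token with three string comparisons (equality, '.'+token suffix test, leaf equality), B precomputes the set of all component-boundary suffixes of layer_name once and answers each token with a single set-membership check.
import Mathlib
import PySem

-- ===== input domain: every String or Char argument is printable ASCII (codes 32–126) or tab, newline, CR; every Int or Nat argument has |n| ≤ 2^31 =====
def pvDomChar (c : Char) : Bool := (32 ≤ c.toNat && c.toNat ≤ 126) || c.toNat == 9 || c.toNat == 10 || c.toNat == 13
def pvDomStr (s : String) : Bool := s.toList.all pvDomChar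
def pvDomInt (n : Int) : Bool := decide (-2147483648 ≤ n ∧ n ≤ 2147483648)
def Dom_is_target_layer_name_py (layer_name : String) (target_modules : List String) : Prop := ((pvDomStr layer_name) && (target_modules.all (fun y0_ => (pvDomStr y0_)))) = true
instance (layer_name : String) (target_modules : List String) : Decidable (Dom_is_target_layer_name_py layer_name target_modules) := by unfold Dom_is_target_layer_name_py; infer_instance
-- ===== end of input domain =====

-- B replaces A's three per-token string tests by one membership check in the
-- precomputed set of component-boundary suffixes of layer_name (alternative decomposition).

-- ===== PORT A =====
-- Port of A. `target_modules == 'all-linear'` compares a list with a str and is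
-- always False for the declared type List String, so that branch is dropped.
-- `layer_name.split('.')` has the literal non-empty separator ".", so split? is
-- always `some`; `[-1]` on its never-empty result is always `some`: `.getD` defaults are unreachable.
def is_target_layer_name_py (layer_name : String) (target_modules : List String) : Bool :=
  let leaf_name := (PySem.List.pyGet? ((PySem.Str.split? layer_name ".").getD []) (-1)).getD ""
  target_modules.any (fun token =>
    layer_name == token || PySem.Str.endswith layer_name ("." ++ token) || leaf_name == token)

-- ===== PORT B =====
def is_target_layer_name_py_alt (layer_name : String) (target_modules : List String) : Bool :=
  let parts := (PySem.Str.split? layer_name ".").getD []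
  let suffixes : PySem.Set String := PySem.Set.ofList
    ((PySem.List.pyRange 0 (parts.length : Int)).map
      (fun i => PySem.Str.join "." (PySem.List.slice parts (some i) none)))
  target_modules.any (fun token => PySem.Set.contains suffixes token)

-- ===== PRECONDITION & SPEC =====

def Spec_is_target_layer_name_py (layer_name : String) (target_modules : List String) (out : Bool) : Prop := out = is_target_layer_name_py_alt layer_name target_modules
instance (layer_name : String) (target_modules : List String) (out : Bool) : Decidable (Spec_is_target_layer_name_py layer_name target_modules out) := by unfold Spec_is_target_layer_name_py; infer_instance

-- ===== CLAIM (what is proved, stated in full; the proofs are below) =====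
def Claim_equal_is_target_layer_name_py : Prop := ∀ (layer_name : String) (target_modules : List String), Dom_is_target_layer_name_py layer_name target_modules → Spec_is_target_layer_name_py layer_name target_modules (is_target_layer_name_py layer_name target_modules)

-- ===== LEMMAS AND PROOFS =====

def splitDot : List Char → List (List Char)
  | [] => [[]]
  | c :: rest =>
    if c = '.' then [] :: splitDot rest
    else match splitDot rest with
      | p :: ps => (c :: p) :: ps
      | [] => [[c]]

theorem splitDot_ne_nil (s : List Char) : splitDot s ≠ [] := by
  cases s with
  | nil => simp [splitDot]
  | cons c rest =>
    simp only [splitDot]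
    split
    · simp
    · cases h : splitDot rest <;> simp

theorem splitOn_go_eq (fuel : Nat) : ∀ (l cur : List Char) (acc : List (List Char)),
    l.length ≤ fuel →
    PySem.Chars.splitOn.go ['.'] fuel l cur acc =
      acc.reverse ++ (match splitDot l with
        | p :: ps => (cur.reverse ++ p) :: ps
        | [] => [cur.reverse]) := by
  induction fuel with
  | zero =>
    intro l cur acc h
    have : l = [] := by cases l <;> simp_all
    subst this
    simp [PySem.Chars.splitOn.go, splitDot]
  | succ n ih =>
    intro l cur acc h
    cases l with
    | nil => simp [PySem.Chars.splitOn.go, splitDot]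
    | cons c rest =>
      by_cases hc : c = '.'
      · subst hc
        rw [show PySem.Chars.splitOn.go ['.'] (n+1) ('.' :: rest) cur acc
            = PySem.Chars.splitOn.go ['.'] n rest [] (cur.reverse :: acc) by
          simp [PySem.Chars.splitOn.go, List.isPrefixOf]]
        rw [ih rest [] (cur.reverse :: acc) (by simpa using Nat.le_of_succ_le_succ h)]
        have := splitDot_ne_nil rest
        cases hsd : splitDot rest with
        | nil => exact absurd hsd this
        | cons p ps => simp [splitDot, hsd]
      · rw [show PySem.Chars.splitOn.go ['.'] (n+1) (c :: rest) cur acc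
            = PySem.Chars.splitOn.go ['.'] n rest (c :: cur) acc by
          simp [PySem.Chars.splitOn.go, List.isPrefixOf, Ne.symm hc]]
        rw [ih rest (c :: cur) acc (by simpa using Nat.le_of_succ_le_succ h)]
        have := splitDot_ne_nil rest
        cases hsd : splitDot rest with
        | nil => exact absurd hsd this
        | cons p ps => simp [splitDot, hsd, hc]

theorem splitOn_eq_splitDot (s : List Char) :
    PySem.Chars.splitOn s ['.'] = splitDot s := by
  rw [PySem.Chars.splitOn, splitOn_go_eq (s.length+1) s [] [] (by omega)]
  have := splitDot_ne_nil s
  cases hsd : splitDot s with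
  | nil => exact absurd hsd this
  | cons p ps => simp


theorem intercalate_cons_cons (sep a b : List Char) (rest : List (List Char)) :
    List.intercalate sep (a :: b :: rest) = a ++ sep ++ List.intercalate sep (b :: rest) := by
  simp [List.intercalate, List.intersperse]

theorem intercalate_singleton (sep a : List Char) : List.intercalate sep [a] = a := by
  simp [List.intercalate]

theorem splitDot_dot (rest : List Char) : splitDot ('.' :: rest) = [] :: splitDot rest := by
  simp [splitDot]

theorem splitDot_cons {c : Char} (hc : c ≠ '.') {rest p : List Char} {ps : List (List Char)}
    (hsd : splitDot rest = p :: ps) : splitDot (c :: rest) = (c :: p) :: ps := by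
  simp [splitDot, hc, hsd]

theorem join_splitDot (s : List Char) : List.intercalate ['.'] (splitDot s) = s := by
  induction s with
  | nil => simp [splitDot, intercalate_singleton]
  | cons c rest ih =>
    have hne := splitDot_ne_nil rest
    cases hsd : splitDot rest with
    | nil => exact absurd hsd hne
    | cons p ps =>
      rw [hsd] at ih
      by_cases hc : c = '.'
      · subst hc
        rw [splitDot_dot, hsd, intercalate_cons_cons, ih]
        simp
      · rw [splitDot_cons hc hsd]
        cases ps with
        | nil =>
          rw [intercalate_singleton] at ih
          rw [intercalate_singleton, ih]
        | cons q qs =>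
          rw [intercalate_cons_cons] at ih ⊢
          simp [← ih]

theorem suffix_iff_splitDot (s : List Char) : ∀ t : List Char,
    ('.' :: t) <:+ s ↔
      ∃ i, 1 ≤ i ∧ i < (splitDot s).length ∧ t = List.intercalate ['.'] ((splitDot s).drop i) := by
  induction s with
  | nil =>
    intro t
    simp [List.suffix_nil, splitDot]
  | cons c rest ih =>
    intro t
    rw [List.suffix_cons_iff]
    have hne := splitDot_ne_nil rest
    cases hsd : splitDot rest with
    | nil => exact absurd hsd hne
    | cons p ps =>
      by_cases hc : c = '.'
      · subst hc
        rw [splitDot_dot, hsd]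
        constructor
        · rintro (h | h)
          · exact ⟨1, by simp, by simp, by
              have : t = rest := by simpa using h
              simpa [this, hsd] using (join_splitDot rest).symm⟩
          · obtain ⟨i, h1, h2, h3⟩ := (ih t).mp h
            rw [hsd] at h2 h3
            refine ⟨i + 1, by omega, by simp at h2 ⊢; omega, by simpa using h3⟩
        · rintro ⟨i, h1, h2, h3⟩
          cases i with
          | zero => omega
          | succ j =>
            cases j with
            | zero =>
              left
              have : t = rest := by
                rw [h3]
                have := join_splitDot rest
                rw [hsd] at this
                simpa using this
              rw [this]
            | succ k =>
              right
              refine (ih t).mpr ⟨k + 1, by omega, ?_, ?_⟩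
              · rw [hsd]; simp at h2 ⊢; omega
              · rw [hsd]; simpa using h3
      · rw [splitDot_cons hc hsd]
        constructor
        · rintro (h | h)
          · exact absurd (List.head_eq_of_cons_eq h).symm hc
          · obtain ⟨i, h1, h2, h3⟩ := (ih t).mp h
            rw [hsd] at h2 h3
            refine ⟨i, h1, by simpa using by simp at h2; omega, ?_⟩
            cases i with
            | zero => omega
            | succ j => simpa using h3
        · rintro ⟨i, h1, h2, h3⟩
          right
          refine (ih t).mpr ⟨i, h1, ?_, ?_⟩
          · rw [hsd]; simp at h2 ⊢; omega
          · rw [hsd]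
            cases i with
            | zero => omega
            | succ j => simpa using h3

theorem token_iff (s t : List Char) :
    (s = t ∨ ('.' :: t) <:+ s ∨ (splitDot s).getLast (splitDot_ne_nil s) = t) ↔
      ∃ i < (splitDot s).length, t = List.intercalate ['.'] ((splitDot s).drop i) := by
  constructor
  · rintro (h | h | h)
    · exact ⟨0, List.length_pos_of_ne_nil (splitDot_ne_nil s), by simpa [join_splitDot] using h.symm⟩
    · obtain ⟨i, _, h2, h3⟩ := (suffix_iff_splitDot s t).mp h
      exact ⟨i, h2, h3⟩
    · refine ⟨(splitDot s).length - 1, by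
        have := List.length_pos_of_ne_nil (splitDot_ne_nil s); omega, ?_⟩
      rw [List.drop_length_sub_one (splitDot_ne_nil s), intercalate_singleton, h]
  · rintro ⟨i, hi, ht⟩
    cases i with
    | zero =>
      left
      simpa [join_splitDot] using ht.symm
    | succ j =>
      right; left
      exact (suffix_iff_splitDot s t).mpr ⟨j + 1, by omega, hi, ht⟩

theorem pyGet?_neg_one {α : Type} (xs : List α) (h : xs ≠ []) :
    PySem.List.pyGet? xs (-1) = some (xs.getLast h) := by
  have hpos := List.length_pos_of_ne_nil h
  simp only [PySem.List.pyGet?, PySem.List.pyIdx?]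
  rw [if_neg (by omega), if_pos (by omega)]
  simp [List.getLast_eq_getElem]

theorem parts_eq (s : String) :
    (PySem.Str.split? s ".").getD [] = (splitDot s.toList).map String.ofList := by
  have : ("." : String).toList = ['.'] := rfl
  simp [PySem.Str.split?, PySem.Chars.split?, this, splitOn_eq_splitDot]

theorem map_ne_nil {α β : Type} (f : α → β) (xs : List α) (h : xs ≠ []) : xs.map f ≠ [] := by
  simpa using h

theorem main_thm (layer_name : String) (target_modules : List String) :
    is_target_layer_name_py layer_name target_modules =
      is_target_layer_name_py_alt layer_name target_modules := by
  unfold is_target_layer_name_py is_target_layer_name_py_alt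
  simp only [parts_eq]
  set cs := layer_name.toList with hcs
  set sd := splitDot cs with hsd
  have hne : sd ≠ [] := splitDot_ne_nil cs
  refine PySem.List.any_congr_mem (fun token _ => ?_)
  -- leaf
  rw [pyGet?_neg_one _ (map_ne_nil _ _ hne)]
  rw [List.getLast_map]
  simp only [Option.getD_some]
  -- both sides to decide of Props
  have hdot : ("." ++ token).toList = '.' :: token.toList := by
    rw [String.toList_append]; rfl
  have hA : (layer_name == token || PySem.Str.endswith layer_name ("." ++ token)
        || String.ofList (sd.getLast hne) == token)
      = decide (cs = token.toList ∨ ('.' :: token.toList) <:+ cs ∨ sd.getLast hne = token.toList) := by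
    rw [Bool.eq_iff_iff]
    simp only [Bool.or_eq_true, beq_iff_eq, decide_eq_true_eq, PySem.Str.endswith_eq,
      hdot, PySem.Chars.endswith_iff]
    constructor
    · rintro ((h | h) | h)
      · exact Or.inl (congrArg String.toList h)
      · exact Or.inr (Or.inl h)
      · exact Or.inr (Or.inr (by rw [← h]; simp))
    · rintro (h | h | h)
      · exact Or.inl (Or.inl (String.toList_inj.mp h))
      · exact Or.inl (Or.inr h)
      · exact Or.inr (by rw [h]; exact String.ofList_toList)
  rw [hA]
  -- B side
  have hB : PySem.Set.contains (PySem.Set.ofList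
      ((PySem.List.pyRange 0 (((sd.map String.ofList)).length : Int)).map
        (fun i => PySem.Str.join "." (PySem.List.slice (sd.map String.ofList) (some i) none)))) token
      = decide (∃ i < sd.length, token.toList = List.intercalate ['.'] (sd.drop i)) := by
    rw [show PySem.Set.contains (PySem.Set.ofList
        ((PySem.List.pyRange 0 (((sd.map String.ofList)).length : Int)).map
          (fun i => PySem.Str.join "." (PySem.List.slice (sd.map String.ofList) (some i) none)))) token
        = (((PySem.List.pyRange 0 (((sd.map String.ofList)).length : Int)).map
          (fun i => PySem.Str.join "." (PySem.List.slice (sd.map String.ofList) (some i) none))) : PySem.Set String).contains token from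
      List.contains_eq_mem token _ ▸ List.contains_eq_mem token _ ▸
        (by rw [Bool.eq_iff_iff]; simp [PySem.Set.mem_ofList])]
    rw [Bool.eq_iff_iff]
    rw [List.contains_eq_mem]
    simp only [decide_eq_true_eq, List.mem_map, PySem.List.mem_pyRange_one]
    constructor
    · rintro ⟨i, ⟨h0, hi⟩, hf⟩
      refine ⟨i.toNat, by simp at hi; omega, ?_⟩
      rw [← hf]
      rw [PySem.List.slice_from _ h0, ← List.map_drop]
      have hid : (String.toList ∘ String.ofList) = id := by funext l; simp
      rw [PySem.Str.toList_join, List.map_map, hid, List.map_id]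
      rfl
    · rintro ⟨j, hj, ht⟩
      refine ⟨(j : Int), ⟨by omega, by simp; omega⟩, ?_⟩
      apply String.toList_inj.mp
      rw [PySem.List.slice_from _ (by omega : (0:Int) ≤ (j:Int)), ← List.map_drop]
      rw [PySem.Str.toList_join, List.map_map]
      simp only [Int.toNat_natCast]
      have : (String.toList ∘ String.ofList) = id := by funext l; simp
      rw [this, List.map_id, ht]
      rfl
  rw [hB]
  exact decide_eq_decide.mpr (by
    have htok := token_iff cs token.toList
    constructor
    · intro h
      exact htok.mp (by tauto)
    · intro h
      have := htok.mpr h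
      tauto)

-- ===== VERDICT (by name: the statement is the Claim_ definition above) =====
theorem is_target_layer_name_py_spec : Claim_equal_is_target_layer_name_py := by
  intro layer_name target_modules _
  unfold Spec_is_target_layer_name_py
  exact main_thm layer_name target_modules
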